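-- pv_equiv track=rewrite | github.com/dmendelsohn/advent_of_code | python/src/year2023/day08/solution.py | find_goal_remainders
-- ===== SOURCE A (Python) =====
-- from typing import TypeAlias
--
-- Graph: TypeAlias = dict[str, tuple[str, str]]
--
-- def find_goal_remainders(
--     instructions: str, graph: Graph, start_node: str, cycle_start: int, cycle_length: int
-- ) -> set[int]:
--     goal_remainders: set[int] = set()
--     num_steps = 0
--     node = start_node
--     while num_steps < cycle_start + cycle_length:
--         if num_steps >= cycle_start and node.endswith("Z"):
--             goal_remainders.add(num_steps % cycle_length)
--
--         inst_idx = num_steps % len(instructions)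
--         node = graph[node][0] if instructions[inst_idx] == "L" else graph[node][1]
--         num_steps += 1
--
--     return goal_remainders
-- ===== SOURCE B (Python) =====
-- def find_goal_remainders(
--     instructions, graph, start_node, cycle_start, cycle_length
-- ):
--     total = cycle_start + cycle_length
--     if total <= 0:
--         return set()
--     L = len(instructions)
--     skip = max(cycle_start, 0)
--     q = skip // L
--     # Transition table: where ONE FULL PASS of the instruction string sends each node.
--     pass_map = {}
--     for k in graph:
--         nd = k
--         for ch in instructions:
--             nd = graph[nd][0] if ch == "L" else graph[nd][1]
--         pass_map[k] = nd
--     # Jump q whole passes at once via the table (instruction index stays ≡ 0 mod L).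
--     node = start_node
--     for _ in range(q):
--         node = pass_map[node]
--     # Walk the remaining steps one by one, recording Z-hits in the window.
--     result = set()
--     for num_steps in range(q * L, total):
--         if num_steps >= cycle_start and node.endswith("Z"):
--             result.add(num_steps % cycle_length)
--         node = graph[node][0] if instructions[num_steps % L] == "L" else graph[node][1]
--     return result
-- ===== Notes on version B (the rewrite author's own statement) =====
-- stated objective: alternative
-- what changed: A walks every one of the cycle_start+cycle_length steps in a single guarded loop; B precomputes a full-pass transition table (node -> node after one whole instruction string), jumps cycle_start // len(instructions) passes via table lookups, and only walks and records the remaining steps.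
-- outside the precondition, e.g. on find_goal_remainders('LL', {'AA': ('AA', 'BB'), 'CC': ('XX', 'XX')}, 'AA', 0, 2): A returns set(), B raises KeyError
import Mathlib
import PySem

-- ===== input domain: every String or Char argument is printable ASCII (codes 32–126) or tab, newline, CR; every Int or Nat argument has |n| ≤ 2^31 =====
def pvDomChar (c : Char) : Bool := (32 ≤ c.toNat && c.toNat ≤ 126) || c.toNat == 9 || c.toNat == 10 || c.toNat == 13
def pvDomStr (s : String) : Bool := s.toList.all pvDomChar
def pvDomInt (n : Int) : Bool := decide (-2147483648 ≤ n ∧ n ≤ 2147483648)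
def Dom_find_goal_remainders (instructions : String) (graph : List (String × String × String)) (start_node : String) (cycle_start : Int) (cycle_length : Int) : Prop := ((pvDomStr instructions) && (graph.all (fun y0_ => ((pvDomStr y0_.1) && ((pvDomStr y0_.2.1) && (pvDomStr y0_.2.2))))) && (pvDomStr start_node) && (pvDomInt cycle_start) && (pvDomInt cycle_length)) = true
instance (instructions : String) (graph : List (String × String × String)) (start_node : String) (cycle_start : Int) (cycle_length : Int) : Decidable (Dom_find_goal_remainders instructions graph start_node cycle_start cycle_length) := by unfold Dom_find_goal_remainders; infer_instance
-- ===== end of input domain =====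

-- B replaces A's single step-by-step walk over the skip phase by a precomputed full-pass transition
-- table (node -> node after one whole instruction string) used to jump cycle_start // len(instructions)
-- passes at once, then walks and records only the remaining steps; different algorithm for the same value.

-- ===== PORT A =====
-- one step of the walk, 'graph[node][0] if instructions[i % len(instructions)] == "L" else graph[node][1]'
-- (this exact expression occurs verbatim in BOTH Pythons, so both ports share it):
def pvStep (instructions : String) (graph : List (String × String × String)) (i : Int) (node : String) : String :=
  let pair := ((PySem.Dict.mk graph).get? node).getD ("", "")  -- KeyError → excluded by Pre_
  if (PySem.Str.pyGet? instructions (PySem.Int.mod i (PySem.Str.len instructions))).getD ' ' = 'L'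
  then pair.1 else pair.2  -- IndexError/ZeroDivisionError → excluded by Pre_

-- A's guarded while-loop, fuel = number of remaining iterations
def fgLoop (instructions : String) (graph : List (String × String × String)) (cycle_start cycle_length : Int) :
    Nat → Int → String → PySem.Set Int → PySem.Set Int
  | 0, _, _, acc => acc
  | n+1, steps, node, acc =>
    let acc' := if cycle_start ≤ steps ∧ PySem.Str.endswith node "Z" = true
                then PySem.Set.add acc (PySem.Int.mod steps cycle_length) else acc
    fgLoop instructions graph cycle_start cycle_length n (steps + 1) (pvStep instructions graph steps node) acc'

def find_goal_remainders (instructions : String) (graph : List (String × String × String)) (start_node : String) (cycle_start : Int) (cycle_length : Int) : List Int :=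
  fgLoop instructions graph cycle_start cycle_length (cycle_start + cycle_length).toNat 0 start_node PySem.Set.empty

-- ===== PORT B =====
-- where one character of the instruction string sends a node
def chStepB (graph : List (String × String × String)) (c : Char) (node : String) : String :=
  let pair := ((PySem.Dict.mk graph).get? node).getD ("", "")
  if c = 'L' then pair.1 else pair.2

-- the inner 'for ch in instructions' loop of B's table construction
def passWalkB (graph : List (String × String × String)) (cs : List Char) (node : String) : String :=
  cs.foldl (fun nd c => chStepB graph c nd) node

-- B's 'for _ in range(q): node = pass_map[node]' jump loop
def jumpB (pm : PySem.Dict String String) : Nat → String → String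
  | 0, node => node
  | n+1, node => jumpB pm n ((pm.get? node).getD "")  -- KeyError → excluded by Pre_

def find_goal_remainders_alt (instructions : String) (graph : List (String × String × String)) (start_node : String) (cycle_start : Int) (cycle_length : Int) : List Int :=
  let total := cycle_start + cycle_length
  if total ≤ 0 then PySem.Set.empty else
    let L := PySem.Str.len instructions
    let skip := max cycle_start 0
    let q := PySem.Int.floordiv skip L  -- ZeroDivisionError if L = 0 → excluded by Pre_
    let pm := PySem.Dict.mk (graph.map (fun e => (e.1, passWalkB graph instructions.toList e.1)))
    let node := jumpB pm q.toNat start_node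
    ((PySem.List.pyRange (q * L) total 1).foldl
      (fun (st : PySem.Set Int × String) i =>
        (if cycle_start ≤ i ∧ PySem.Str.endswith st.2 "Z" = true
         then PySem.Set.add st.1 (PySem.Int.mod i cycle_length) else st.1,
         pvStep instructions graph i st.2))
      (PySem.Set.empty, node)).1

-- ===== PRECONDITION & SPEC =====
-- Pre_ admits inputs on which Python A returns without an exception: either the loop never runs, or the
-- instruction string is nonempty, the start node is a key, and every successor named in the graph is a key.
-- The closure requirement is a closed-form over-approximation (whether a walk actually reaches a missing key
-- cannot be stated without simulating it), so it also excludes some runs on which A happens to return.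
def Pre_find_goal_remainders (instructions : String) (graph : List (String × String × String)) (start_node : String) (cycle_start : Int) (cycle_length : Int) : Prop :=
  cycle_start + cycle_length ≤ 0 ∨
    (0 < PySem.Str.len instructions ∧
     start_node ∈ graph.map (·.1) ∧
     ∀ e ∈ graph, e.2.1 ∈ graph.map (·.1) ∧ e.2.2 ∈ graph.map (·.1))
instance (instructions : String) (graph : List (String × String × String)) (start_node : String) (cycle_start : Int) (cycle_length : Int) : Decidable (Pre_find_goal_remainders instructions graph start_node cycle_start cycle_length) := by unfold Pre_find_goal_remainders; infer_instance

def pvWitness_find_goal_remainders : String × (List (String × String × String)) × String × Int × Int :=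
  ("LR", [("11A", "11Z", "11A"), ("11Z", "11A", "11Z")], "11A", 1, 2)

def Spec_find_goal_remainders (instructions : String) (graph : List (String × String × String)) (start_node : String) (cycle_start : Int) (cycle_length : Int) (out : List Int) : Prop := out = find_goal_remainders_alt instructions graph start_node cycle_start cycle_length
instance (instructions : String) (graph : List (String × String × String)) (start_node : String) (cycle_start : Int) (cycle_length : Int) (out : List Int) : Decidable (Spec_find_goal_remainders instructions graph start_node cycle_start cycle_length out) := by unfold Spec_find_goal_remainders; infer_instance

-- ===== CLAIM =====
def Claim_equal_find_goal_remainders : Prop := ∀ (instructions : String) (graph : List (String × String × String)) (start_node : String) (cycle_start : Int) (cycle_length : Int), Dom_find_goal_remainders instructions graph start_node cycle_start cycle_length → Pre_find_goal_remainders instructions graph start_node cycle_start cycle_length → Spec_find_goal_remainders instructions graph start_node cycle_start cycle_length (find_goal_remainders instructions graph start_node cycle_start cycle_length)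

-- ===== LEMMAS AND PROOFS =====

-- A's walk without recording (proof-side abbreviation for iterated pvStep)
def walkA (instructions : String) (graph : List (String × String × String)) :
    Nat → Int → String → String
  | 0, _, node => node
  | n+1, i, node => walkA instructions graph n (i+1) (pvStep instructions graph i node)

-- lookup in Dict.mk finds an entry of the list
theorem get?_mk_mem (graph : List (String × String × String)) (node : String) (v : String × String)
    (h : (PySem.Dict.mk graph).get? node = some v) : (node, v) ∈ graph := by
  induction graph with
  | nil => simp [PySem.Dict.get?] at h
  | cons e rest ih =>
    rw [show (e : String × String × String) = (e.1, e.2) from rfl,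
        PySem.Dict.get?_mk_cons] at h
    by_cases he : e.1 = node
    · simp only [he, BEq.rfl, if_pos, Option.some.injEq] at h
      simp [← he, ← h]
    · rw [if_neg (by simpa using he)] at h
      exact List.mem_cons_of_mem _ (ih h)

-- a key has a lookup
theorem get?_mk_of_mem (graph : List (String × String × String)) (node : String)
    (h : node ∈ graph.map (·.1)) : ∃ v, (PySem.Dict.mk graph).get? node = some v := by
  induction graph with
  | nil => simp at h
  | cons e rest ih =>
    rw [show (e : String × String × String) = (e.1, e.2) from rfl, PySem.Dict.get?_mk_cons]
    by_cases he : e.1 = node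
    · exact ⟨e.2, by simp [he]⟩
    · rw [if_neg (by simp [he])]
      simp only [List.map_cons, List.mem_cons] at h
      rcases h with h | h
      · exact absurd h.symm he
      · exact ih h

-- a table keyed by the first components with key-determined values looks up the value of any key
theorem get?_mk_map_fst (l : List (String × String × String)) (f : String → String) (node : String)
    (h : node ∈ l.map (·.1)) :
    (PySem.Dict.mk (l.map (fun e => (e.1, f e.1)))).get? node = some (f node) := by
  induction l with
  | nil => simp at h
  | cons e rest ih =>
    rw [List.map_cons, PySem.Dict.get?_mk_cons]
    by_cases he : e.1 = node
    · simp [he]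
    · rw [if_neg (by simp [he])]
      simp only [List.map_cons, List.mem_cons] at h
      rcases h with h | h
      · exact absurd h.symm he
      · exact ih h

-- closure: one character step stays among the keys
theorem chStepB_mem (graph : List (String × String × String))
    (hC : ∀ e ∈ graph, e.2.1 ∈ graph.map (·.1) ∧ e.2.2 ∈ graph.map (·.1))
    (c : Char) (node : String) (h : node ∈ graph.map (·.1)) :
    chStepB graph c node ∈ graph.map (·.1) := by
  obtain ⟨v, hv⟩ := get?_mk_of_mem graph node h
  have hm := get?_mk_mem graph node v hv
  have := hC _ hm
  unfold chStepB
  rw [hv]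
  by_cases hc : c = 'L' <;> simp [hc, this.1, this.2]

theorem passWalkB_mem (graph : List (String × String × String))
    (hC : ∀ e ∈ graph, e.2.1 ∈ graph.map (·.1) ∧ e.2.2 ∈ graph.map (·.1))
    (cs : List Char) (node : String) (h : node ∈ graph.map (·.1)) :
    passWalkB graph cs node ∈ graph.map (·.1) := by
  induction cs generalizing node with
  | nil => exact h
  | cons c cs ih => exact ih _ (chStepB_mem graph hC c node h)

-- pvStep is a character step at the right character
theorem pvStep_eq_chStepB (instructions : String) (graph : List (String × String × String)) (i : Int) (node : String) :
    pvStep instructions graph i node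
      = chStepB graph ((PySem.Str.pyGet? instructions (PySem.Int.mod i (PySem.Str.len instructions))).getD ' ') node := rfl

-- splitting A's loop: as long as the guard index stays below cycle_start, the loop only walks
theorem fgLoop_skip (instructions : String) (graph : List (String × String × String))
    (cycle_start cycle_length : Int) :
    ∀ (m n : Nat) (s : Int) (node : String) (acc : PySem.Set Int),
      (∀ j : Nat, j < m → s + (j : Int) < cycle_start) →
      fgLoop instructions graph cycle_start cycle_length (m + n) s node acc
        = fgLoop instructions graph cycle_start cycle_length n (s + (m : Int)) (walkA instructions graph m s node) acc := by
  intro m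
  induction m with
  | zero => intro n s node acc _; simp [walkA]
  | succ m ih =>
    intro n s node acc h
    rw [Nat.succ_add]
    show fgLoop instructions graph cycle_start cycle_length (m + n + 1) s node acc = _
    rw [fgLoop]
    have hg : ¬ (cycle_start ≤ s ∧ PySem.Str.endswith node "Z" = true) := by
      have := h 0 (Nat.succ_pos m); intro hcs; omega
    rw [if_neg hg]
    rw [ih n (s+1) (pvStep instructions graph s node) acc (by intro j hj; have := h (j+1) (by omega); push_cast at this ⊢; omega)]
    have hidx : (s + 1) + (m : Int) = s + ((m + 1 : Nat) : Int) := by push_cast; ring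
    rw [hidx]
    rfl

theorem walkA_add (instructions : String) (graph : List (String × String × String)) :
    ∀ (a b : Nat) (i : Int) (node : String),
      walkA instructions graph (a + b) i node
        = walkA instructions graph b (i + (a : Int)) (walkA instructions graph a i node) := by
  intro a
  induction a with
  | zero => intro b i node; simp [walkA]
  | succ a ih =>
    intro b i node
    rw [Nat.succ_add]
    show walkA instructions graph (a + b) (i+1) (pvStep instructions graph i node) = _
    rw [ih]
    congr 1
    push_cast; ring

-- one full pass of the walk from an index ≡ 0 (mod L) is the pass walk over the characters
theorem walkA_pass (instructions : String) (graph : List (String × String × String)) (c : Int) :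
    ∀ (m j : Nat) (node : String), j + m = instructions.toList.length →
      walkA instructions graph m (c * (instructions.toList.length : Int) + (j : Int)) node
        = passWalkB graph (instructions.toList.drop j) node := by
  intro m
  induction m with
  | zero =>
    intro j node hj
    subst hj
    simp only [walkA, passWalkB, List.drop_length, List.foldl_nil]
  | succ m ih =>
    intro j node hj
    have hjlt : j < instructions.toList.length := by omega
    rw [← List.getElem_cons_drop (as := instructions.toList) (i := j) hjlt]
    show walkA instructions graph m (c * (instructions.toList.length : Int) + (j : Int) + 1)
        (pvStep instructions graph (c * (instructions.toList.length : Int) + (j : Int)) node) = _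
    have hchar : pvStep instructions graph (c * (instructions.toList.length : Int) + (j : Int)) node
        = chStepB graph (instructions.toList[j]) node := by
      rw [pvStep_eq_chStepB]
      congr 1
      have hlen : PySem.Str.len instructions = (instructions.toList.length : Int) := by
        simp [PySem.Str.len_eq]
      rw [hlen]
      have hmod : PySem.Int.mod (c * (instructions.toList.length : Int) + (j : Int)) (instructions.toList.length : Int) = (j : Int) := by
        rw [PySem.Int.mod_eq_emod_of_pos (by exact_mod_cast Nat.pos_of_ne_zero (by omega))]
        rw [Int.add_comm, mul_comm c ((instructions.toList.length : Nat) : Int), Int.add_mul_emod_self_left]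
        exact Int.emod_eq_of_lt (by omega) (by exact_mod_cast hjlt)
      rw [hmod]
      simp [pysem, List.getElem?_eq_getElem hjlt]
    rw [hchar]
    have hidx : c * (instructions.toList.length : Int) + (j : Int) + 1
        = c * (instructions.toList.length : Int) + ((j + 1 : Nat) : Int) := by push_cast; ring
    rw [hidx, ih (j+1) (chStepB graph (instructions.toList[j]) node) (by omega)]
    rfl

-- jumping q passes is walking q·L steps
theorem jumpB_eq (instructions : String) (graph : List (String × String × String))
    (hC : ∀ e ∈ graph, e.2.1 ∈ graph.map (·.1) ∧ e.2.2 ∈ graph.map (·.1)) :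
    ∀ (n c : Nat) (node : String), node ∈ graph.map (·.1) →
      jumpB (PySem.Dict.mk (graph.map (fun e => (e.1, passWalkB graph instructions.toList e.1)))) n node
        = walkA instructions graph (n * instructions.toList.length) ((c : Int) * (instructions.toList.length : Int)) node := by
  intro n
  induction n with
  | zero => intro c node _; simp [jumpB, walkA]
  | succ n ih =>
    intro c node hmem
    show jumpB _ n _ = _
    rw [get?_mk_map_fst graph (passWalkB graph instructions.toList) node hmem]
    have hpass : walkA instructions graph instructions.toList.length ((c : Int) * (instructions.toList.length : Int)) node
        = passWalkB graph instructions.toList node := by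
      have := walkA_pass instructions graph (c : Int) instructions.toList.length 0 node (by omega)
      simpa using this
    have hsplit : (n + 1) * instructions.toList.length = instructions.toList.length + n * instructions.toList.length := by ring
    rw [hsplit, walkA_add, hpass]
    have hidx : (c : Int) * (instructions.toList.length : Int) + (instructions.toList.length : Int)
        = ((c + 1 : Nat) : Int) * (instructions.toList.length : Int) := by push_cast; ring
    rw [hidx]
    simp only [Option.getD_some]
    exact ih (c+1) (passWalkB graph instructions.toList node) (passWalkB_mem graph hC instructions.toList node hmem)


-- B's recording fold over the range is A's loop with matching fuel
theorem foldB_eq_fgLoop (instructions : String) (graph : List (String × String × String))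
    (cycle_start cycle_length : Int) :
    ∀ (n : Nat) (s t : Int) (node : String) (acc : PySem.Set Int), (t - s).toNat = n →
      ((PySem.List.pyRange s t 1).foldl
        (fun (st : PySem.Set Int × String) i =>
          (if cycle_start ≤ i ∧ PySem.Str.endswith st.2 "Z" = true
           then PySem.Set.add st.1 (PySem.Int.mod i cycle_length) else st.1,
           pvStep instructions graph i st.2))
        (acc, node)).1
      = fgLoop instructions graph cycle_start cycle_length n s node acc := by
  intro n
  induction n with
  | zero =>
    intro s t node acc h
    rw [PySem.List.pyRange_one_eq_nil (by omega)]
    simp [fgLoop]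
  | succ n ih =>
    intro s t node acc h
    rw [PySem.List.pyRange_one_cons (by omega)]
    rw [List.foldl_cons, fgLoop]
    exact ih (s+1) t _ _ (by omega)

-- no step of the loop reaches the recording window: the accumulator is returned unchanged
theorem fgLoop_all_skip (instructions : String) (graph : List (String × String × String))
    (cycle_start cycle_length : Int) (n : Nat) (s : Int) (node : String) (acc : PySem.Set Int)
    (h : ∀ j : Nat, j < n → s + (j : Int) < cycle_start) :
    fgLoop instructions graph cycle_start cycle_length n s node acc = acc := by
  have := fgLoop_skip instructions graph cycle_start cycle_length n 0 s node acc h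
  simpa [fgLoop] using this

-- ===== VERDICT =====
theorem find_goal_remainders_spec : Claim_equal_find_goal_remainders := by
  intro instructions graph start_node cycle_start cycle_length _ hpre
  unfold Spec_find_goal_remainders
  by_cases htot : cycle_start + cycle_length ≤ 0
  · simp only [find_goal_remainders, find_goal_remainders_alt, if_pos htot]
    have h0 : (cycle_start + cycle_length).toNat = 0 := by omega
    rw [h0]
    rfl
  · rcases hpre with h0 | ⟨hL, hstart, hC⟩
    · omega
    simp only [find_goal_remainders, find_goal_remainders_alt, if_neg htot]
    have hlen : PySem.Str.len instructions = (instructions.toList.length : Int) := by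
      simp [PySem.Str.len_eq]
    set Lc := instructions.toList.length with hLc
    have hLpos : 0 < Lc := by rw [hlen] at hL; exact_mod_cast hL
    set total := cycle_start + cycle_length with htotdef
    set q := PySem.Int.floordiv (max cycle_start 0) (PySem.Str.len instructions) with hqdef
    have hq0 : 0 ≤ q := by
      rw [hqdef, PySem.Int.floordiv_eq_ediv_of_pos hL]
      exact Int.ediv_nonneg (le_max_right _ _) (le_of_lt hL)
    have hqL : q * PySem.Str.len instructions ≤ max cycle_start 0 := by
      rw [hqdef, PySem.Int.floordiv_eq_ediv_of_pos hL]
      exact Int.ediv_mul_le _ (by omega)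
    have hqL0 : 0 ≤ q * PySem.Str.len instructions := by
      exact mul_nonneg hq0 (le_of_lt hL)
    rw [foldB_eq_fgLoop instructions graph cycle_start cycle_length
      ((total - q * PySem.Str.len instructions).toNat) (q * PySem.Str.len instructions) total _ _ rfl]
    rw [jumpB_eq instructions graph hC q.toNat 0 start_node hstart]
    by_cases hcl : cycle_length ≤ 0
    · -- the recording window is empty on both sides
      rw [fgLoop_all_skip _ _ _ _ _ _ _ _ (by intro j hj; omega),
          fgLoop_all_skip _ _ _ _ _ _ _ _
            (by intro j hj
                have h2 : (j:Int) < total - q * PySem.Str.len instructions := (by omega)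
                omega)]
    · -- split A's loop at q·L steps and identify the walked node with the jumped one
      have hlt : q * PySem.Str.len instructions < total := by
        have : max cycle_start 0 < total := by omega
        omega
      have hfuel : total.toNat = (q * PySem.Str.len instructions).toNat + (total - q * PySem.Str.len instructions).toNat := by
        omega
      rw [hfuel, fgLoop_skip instructions graph cycle_start cycle_length _ _ 0 start_node PySem.Set.empty
        (by intro j hj
            have h2 : (j : Int) < q * PySem.Str.len instructions := (by omega)
            omega)]
      have hnat : (q * PySem.Str.len instructions).toNat = q.toNat * Lc := by
        rw [hlen, ← Int.toNat_of_nonneg hq0, ← Nat.cast_mul, Int.toNat_natCast, Int.toNat_natCast]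
      have hidx : (0 : Int) + ((q * PySem.Str.len instructions).toNat : Int) = q * PySem.Str.len instructions := by
        omega
      rw [hidx, hnat]
      have hz : (((0:Nat) : Int)) * (instructions.toList.length : Int) = 0 := by push_cast; ring
      rw [hz]
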